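-- pv_equiv track=rewrite | github.com/smsxgz/euler_project | problem_36/Double-base_palindromes.py | makePalindromeBase2
-- ===== SOURCE A (Python) =====
-- def makePalindromeBase2(n, oddlength):
--     res = n
--     if oddlength:
--         n = n >> 1
--     while n > 0:
--         res = (res << 1) + (n & 1)
--         n = n >> 1
--     return res
-- ===== SOURCE B (Python) =====
-- def makePalindromeBase2(n, oddlength):
--     # String-based: mirror the binary representation instead of shifting bits.
--     if n <= 0:
--         return n
--     s = bin(n)[2:]
--     half = s[:-1] if oddlength else s
--     return int(s + half[::-1], 2)
-- ===== Notes on version B (the rewrite author's own statement) =====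
-- stated objective: simpler
-- what changed: Replaces the shift-and-append bit loop with string concatenation: take the binary string of n, append the reverse of its (possibly last-bit-dropped) copy, and parse it back in base 2.
import Mathlib
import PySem

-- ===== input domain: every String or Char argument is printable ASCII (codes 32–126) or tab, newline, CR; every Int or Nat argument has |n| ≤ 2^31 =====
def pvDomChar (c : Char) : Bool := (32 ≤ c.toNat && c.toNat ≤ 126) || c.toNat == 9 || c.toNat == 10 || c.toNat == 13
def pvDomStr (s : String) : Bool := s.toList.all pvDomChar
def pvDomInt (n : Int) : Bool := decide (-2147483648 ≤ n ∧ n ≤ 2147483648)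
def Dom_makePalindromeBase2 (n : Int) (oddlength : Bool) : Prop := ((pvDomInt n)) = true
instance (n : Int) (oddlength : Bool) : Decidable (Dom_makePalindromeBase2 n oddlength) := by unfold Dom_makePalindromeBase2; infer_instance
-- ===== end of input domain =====

-- B mirrors the binary string of n instead of running A's shift-and-append bit loop (objective: simpler).

-- ===== PORT A =====
-- the while loop: res, n are the loop state
def pvLoopA (res : Int) (n : Int) : Int :=
  if _h : n > 0 then pvLoopA (res <<< (1:Nat) + PySem.Int.band n 1) (n >>> (1:Nat)) else res
termination_by n.toNat
decreasing_by
  simp only [Int.shiftRight_eq_div_pow]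
  omega

def makePalindromeBase2 (n : Int) (oddlength : Bool) : Int :=
  pvLoopA n (if oddlength then n >>> (1:Nat) else n)

-- ===== PORT B =====
-- hand port of bin(n)[2:] — exact for n > 0 (B only calls it there)
def pvBinStr (m : Nat) : List Char :=
  if m = 0 then [] else pvBinStr (m / 2) ++ [if m % 2 = 1 then '1' else '0']

-- hand port of int(s, 2) — exact for nonempty strings of '0'/'1' (B only calls it on those)
def pvParse2 (cs : List Char) : Int :=
  cs.foldl (fun a c => 2 * a + (if c = '1' then 1 else 0)) 0

def makePalindromeBase2_alt (n : Int) (oddlength : Bool) : Int :=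
  if n ≤ 0 then n
  else
    let s := pvBinStr n.toNat
    let half := if oddlength then s.dropLast else s
    pvParse2 (s ++ half.reverse)

-- ===== PRECONDITION & SPEC =====
def Spec_makePalindromeBase2 (n : Int) (oddlength : Bool) (out : Int) : Prop := out = makePalindromeBase2_alt n oddlength
instance (n : Int) (oddlength : Bool) (out : Int) : Decidable (Spec_makePalindromeBase2 n oddlength out) := by unfold Spec_makePalindromeBase2; infer_instance

-- ===== CLAIM (what is proved, stated in full; the proofs are below) =====
def Claim_equal_makePalindromeBase2 : Prop := ∀ (n : Int) (oddlength : Bool), Dom_makePalindromeBase2 n oddlength → Spec_makePalindromeBase2 n oddlength (makePalindromeBase2 n oddlength)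

-- ===== LEMMAS AND PROOFS =====

-- the folding step of pvParse2
def pvStep (a : Int) (c : Char) : Int := 2 * a + (if c = '1' then 1 else 0)

theorem pvLoopA_nonpos (res n : Int) (h : n ≤ 0) : pvLoopA res n = res := by
  rw [pvLoopA]
  simp [show ¬ n > 0 by omega]

-- A's loop appends the bits of m, LSB first = the reverse of the binary string of m
theorem pvLoopA_eq_foldl (m : Nat) : ∀ res : Int,
    pvLoopA res (m : Int) = List.foldl pvStep res (pvBinStr m).reverse := by
  induction m using Nat.strong_induction_on with
  | _ m ih =>
    intro res
    by_cases hm : m = 0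
    · subst hm
      rw [pvLoopA_nonpos _ _ (by omega)]
      simp [pvBinStr]
    · rw [pvLoopA]
      have h2 : ((m:Int) >>> (1:Nat)) = ((m / 2 : Nat) : Int) := by
        simp [Int.shiftRight_eq_div_pow]
      have hb : PySem.Int.band (m:Int) 1 = ((m % 2 : Nat) : Int) := by
        rw [PySem.Int.band_one]; exact_mod_cast PySem.Int.mod_natCast m 2
      have hs : res <<< (1:Nat) = 2 * res := by simp [Int.shiftLeft_eq]; ring
      rw [dif_pos (by exact_mod_cast Nat.pos_of_ne_zero hm), h2, hs, hb,
          ih (m / 2) (by omega)]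
      conv_rhs => rw [pvBinStr, if_neg hm]
      simp only [List.reverse_append, List.reverse_cons, List.reverse_nil,
        List.nil_append, List.cons_append, List.foldl_cons]
      congr 1
      unfold pvStep
      rcases Nat.mod_two_eq_zero_or_one m with h | h <;> simp [h]

-- parsing the binary string of m gives back m
theorem pvParse2_binStr (m : Nat) : List.foldl pvStep 0 (pvBinStr m) = (m : Int) := by
  induction m using Nat.strong_induction_on with
  | _ m ih =>
    by_cases hm : m = 0
    · subst hm; simp [pvBinStr]
    · rw [pvBinStr, if_neg hm, List.foldl_append, ih (m / 2) (by omega)]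
      unfold pvStep
      have := Nat.div_add_mod m 2
      rcases Nat.mod_two_eq_zero_or_one m with h | h <;>
        simp [h] <;> omega

theorem pvBinStr_half (m : Nat) (hm : m ≠ 0) :
    pvBinStr (m / 2) = (pvBinStr m).dropLast := by
  conv_rhs => rw [pvBinStr, if_neg hm]
  rw [List.dropLast_concat]

-- ===== VERDICT (by name: the statement is the Claim_ definition above) =====
theorem makePalindromeBase2_spec : Claim_equal_makePalindromeBase2 := by
  intro n oddlength _
  unfold Spec_makePalindromeBase2 makePalindromeBase2 makePalindromeBase2_alt
  by_cases hn : n ≤ 0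
  · -- loop body never runs: its argument is ≤ 0
    have hsh : n >>> (1:Nat) ≤ 0 := by
      simp only [Int.shiftRight_eq_div_pow]; omega
    rw [if_pos hn]
    cases oddlength <;> simp [pvLoopA_nonpos _ _ hsh, pvLoopA_nonpos _ _ hn]
  · rw [if_neg hn]
    set N := n.toNat with hN
    have hcast : (N : Int) = n := by omega
    have hN0 : N ≠ 0 := by omega
    have harg : (if oddlength then n >>> (1:Nat) else n)
        = ((if oddlength then N / 2 else N : Nat) : Int) := by
      cases oddlength
      · simpa using hcast.symm
      · simp only [if_pos, Int.shiftRight_eq_div_pow]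
        simp only [pow_one]
        omega
    rw [harg, pvLoopA_eq_foldl]
    show List.foldl pvStep n _ = pvParse2 _
    unfold pvParse2
    rw [List.foldl_append]
    show _ = List.foldl (fun a c => pvStep a c) (List.foldl (fun a c => pvStep a c) 0 (pvBinStr N)) _
    simp only [show (fun a c => pvStep a c) = pvStep from rfl]
    rw [pvParse2_binStr, hcast]
    cases oddlength
    · simp
    · simp [pvBinStr_half N hN0]
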